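-- pv_equiv track=rewrite | github.com/tulika-99/DS_Algorithms | Lexicigraphically Smallest:Largest/lexicographically.py | getSmallestLargest
-- ===== SOURCE A (Python) =====
-- def getSmallestLargest(s, k):
--     curr = s[:k]
--     lexmin = curr
--     lexmax = curr
--     for i in range(k, len(s)):
--         curr = curr[1:k] + s[i]
--         if lexmax < curr:
--             lexmax = curr
--         if lexmin > curr:
--             lexmin = curr
--
--     return lexmin, lexmax
-- ===== SOURCE B (Python) =====
-- def getSmallestLargest(s, k):
--     windows = sorted(s[i:i+k] for i in range(max(1, len(s) - k + 1)))
--     return windows[0], windows[-1]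
-- ===== Notes on version B (the rewrite author's own statement) =====
-- stated objective: alternative
-- what changed: Instead of sliding a window incrementally (curr = curr[1:k] + s[i]) and updating running min/max with explicit comparisons, B materialises all length-k windows, sorts them once (stable sort), and reads the answer off the two ends of the sorted list.
-- intended difference: For k <= 0 on a non-empty string A's incremental slicing degenerates (e.g. A('ab',0) returns ('','b'), mixing a length-0 minimum with length-1 windows); B returns the min/max of the actual s[i:i+k] windows, e.g. ('',''), which is the intended meaning of length-k windows. — e.g. on getSmallestLargest("ab", 0): A returns ["", "b"], B returns ["", ""]
import Mathlib
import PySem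

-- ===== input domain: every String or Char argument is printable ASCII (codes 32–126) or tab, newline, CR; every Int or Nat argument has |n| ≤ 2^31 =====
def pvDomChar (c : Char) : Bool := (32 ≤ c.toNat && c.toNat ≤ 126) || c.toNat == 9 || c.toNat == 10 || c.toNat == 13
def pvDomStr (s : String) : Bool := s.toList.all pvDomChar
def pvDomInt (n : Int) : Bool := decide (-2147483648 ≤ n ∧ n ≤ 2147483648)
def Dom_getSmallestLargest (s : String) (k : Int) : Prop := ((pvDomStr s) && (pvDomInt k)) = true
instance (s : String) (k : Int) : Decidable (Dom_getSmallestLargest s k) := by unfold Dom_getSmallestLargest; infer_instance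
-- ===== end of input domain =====

-- B builds the list of all length-k windows, sorts it once, and returns its two ends, instead of
-- A's incremental sliding window curr = curr[1:k] + s[i] with running min/max comparisons (objective: alternative).

-- ===== PORT A =====
-- literal port of A; s[i] is ported as pyGetD (IndexError inputs, exactly k < -len(s), are excluded by Pre_)
def getSmallestLargest (s : String) (k : Int) : List String :=
  let cs := s.toList
  let curr := PySem.List.slice cs none (some k)
  let st := (PySem.List.pyRange k (cs.length : Int) 1).foldl
    (fun (st : List Char × List Char × List Char) i =>
      let curr := PySem.List.slice st.1 (some 1) (some k) ++ [PySem.List.pyGetD cs i ' ']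
      let lexmax := if st.2.2 < curr then curr else st.2.2
      let lexmin := if curr < st.2.1 then curr else st.2.1
      (curr, lexmin, lexmax)) (curr, curr, curr)
  [String.ofList st.2.1, String.ofList st.2.2]

-- ===== PORT B =====
-- sorted(...) is PySem.List.sorted (stable); windows[0] / windows[-1] are pyGetD at 0 / -1
def getSmallestLargest_alt (s : String) (k : Int) : List String :=
  let cs := s.toList
  let windows := PySem.List.sorted
    ((PySem.List.pyRange 0 (max 1 ((cs.length : Int) - k + 1)) 1).map
      (fun i => PySem.List.slice cs (some i) (some (i + k)))) (fun w => w) false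
  [String.ofList (PySem.List.pyGetD windows 0 []),
   String.ofList (PySem.List.pyGetD windows (-1) [])]

-- ===== PRECONDITION & SPEC =====
-- Pre_ excludes exactly the inputs where A raises IndexError: s[i] with i = k < -len(s).
def Pre_getSmallestLargest (s : String) (k : Int) : Prop := -(s.toList.length : Int) ≤ k
instance (s : String) (k : Int) : Decidable (Pre_getSmallestLargest s k) := by
  unfold Pre_getSmallestLargest; infer_instance
def pvWitness_getSmallestLargest : String × Int := ("ba", 1)

-- For k ≤ 0 on a non-empty string, A's incremental slicing degenerates (A("ab",0) = ("","b"), mixing a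
-- length-0 minimum with single-character windows); B returns the min/max of the actual s[i:i+k] windows
-- (e.g. ("","")), which is the intended meaning of length-k windows.
def D_getSmallestLargest (s : String) (k : Int) : Prop := k ≤ 0 ∧ s ≠ ""
instance (s : String) (k : Int) : Decidable (D_getSmallestLargest s k) := by
  unfold D_getSmallestLargest; infer_instance
def Spec_getSmallestLargest (s : String) (k : Int) (out : List String) : Prop :=
  ¬ D_getSmallestLargest s k → out = getSmallestLargest_alt s k
instance (s : String) (k : Int) (out : List String) : Decidable (Spec_getSmallestLargest s k out) := by
  unfold Spec_getSmallestLargest; infer_instance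
def pvDiffWitness_getSmallestLargest : String × Int := ("ab", 0)
def pvDiffWitnessOut_getSmallestLargest : (List String) × (List String) := (["", "b"], ["", ""])

-- ===== CLAIM (what is proved, stated in full; the proofs are below) =====
def Claim_unchanged_getSmallestLargest : Prop := ∀ (s : String) (k : Int),
  Dom_getSmallestLargest s k → Pre_getSmallestLargest s k →
  Spec_getSmallestLargest s k (getSmallestLargest s k)
def Claim_changed_getSmallestLargest : Prop :=
  Dom_getSmallestLargest (pvDiffWitness_getSmallestLargest.1) (pvDiffWitness_getSmallestLargest.2) ∧
  Pre_getSmallestLargest (pvDiffWitness_getSmallestLargest.1) (pvDiffWitness_getSmallestLargest.2) ∧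
  D_getSmallestLargest (pvDiffWitness_getSmallestLargest.1) (pvDiffWitness_getSmallestLargest.2) ∧
  getSmallestLargest (pvDiffWitness_getSmallestLargest.1) (pvDiffWitness_getSmallestLargest.2) = pvDiffWitnessOut_getSmallestLargest.1 ∧
  getSmallestLargest_alt (pvDiffWitness_getSmallestLargest.1) (pvDiffWitness_getSmallestLargest.2) = pvDiffWitnessOut_getSmallestLargest.2 ∧
  pvDiffWitnessOut_getSmallestLargest.1 ≠ pvDiffWitnessOut_getSmallestLargest.2
-- ===== LEMMAS AND PROOFS =====
def pvMin (m x : List Char) : List Char := if x < m then x else m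
def pvMax (m x : List Char) : List Char := if m < x then x else m
def pvW (cs : List Char) (K t : Nat) : List Char := (cs.drop t).take K
def pvStepA (cs : List Char) (k : Int) (st : List Char × List Char × List Char) (i : Int) :
    List Char × List Char × List Char :=
  let curr := PySem.List.slice st.1 (some 1) (some k) ++ [PySem.List.pyGetD cs i ' ']
  let lexmax := if st.2.2 < curr then curr else st.2.2
  let lexmin := if curr < st.2.1 then curr else st.2.1
  (curr, lexmin, lexmax)

lemma portA_eq (s : String) (k : Int) :
    getSmallestLargest s k =
      [String.ofList ((PySem.List.pyRange k (s.toList.length : Int) 1).foldl (pvStepA s.toList k)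
         (PySem.List.slice s.toList none (some k), PySem.List.slice s.toList none (some k),
          PySem.List.slice s.toList none (some k))).2.1,
       String.ofList ((PySem.List.pyRange k (s.toList.length : Int) 1).foldl (pvStepA s.toList k)
         (PySem.List.slice s.toList none (some k), PySem.List.slice s.toList none (some k),
          PySem.List.slice s.toList none (some k))).2.2] := rfl

lemma portB_eq (s : String) (k : Int) :
    getSmallestLargest_alt s k =
      [String.ofList (PySem.List.pyGetD (PySem.List.sorted
         ((PySem.List.pyRange 0 (max 1 ((s.toList.length : Int) - k + 1)) 1).map
           (fun i => PySem.List.slice s.toList (some i) (some (i + k)))) (fun w => w) false) 0 []),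
       String.ofList (PySem.List.pyGetD (PySem.List.sorted
         ((PySem.List.pyRange 0 (max 1 ((s.toList.length : Int) - k + 1)) 1).map
           (fun i => PySem.List.slice s.toList (some i) (some (i + k)))) (fun w => w) false) (-1) [])] := rfl

lemma slice_nil_chars (a b : Option Int) : PySem.List.slice ([] : List Char) a b = [] := by
  cases h : PySem.List.slice ([] : List Char) a b with
  | nil => rfl
  | cons y ys =>
    have : y ∈ PySem.List.slice ([] : List Char) a b := by rw [h]; exact List.mem_cons_self
    exact absurd (PySem.List.mem_of_mem_slice _ a b this) List.not_mem_nil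

lemma pvMin_le_left (m x : List Char) : pvMin m x ≤ m := by
  unfold pvMin; split_ifs with h
  · exact le_of_lt h
  · exact le_refl m

lemma pvMin_le_right (m x : List Char) : pvMin m x ≤ x := by
  unfold pvMin; split_ifs with h
  · exact le_refl x
  · exact not_lt.1 h

lemma pvMax_ge_left (m x : List Char) : m ≤ pvMax m x := by
  unfold pvMax; split_ifs with h
  · exact le_of_lt h
  · exact le_refl m

lemma pvMax_ge_right (m x : List Char) : x ≤ pvMax m x := by
  unfold pvMax; split_ifs with h
  · exact le_refl x
  · exact not_lt.1 h

lemma minfold_mem : ∀ (xs : List (List Char)) (x : List Char), xs.foldl pvMin x ∈ x :: xs := by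
  intro xs
  induction xs with
  | nil => intro x; simp
  | cons a t ih =>
    intro x
    rw [List.foldl_cons]
    have h := ih (pvMin x a)
    have hma : pvMin x a = x ∨ pvMin x a = a := by
      unfold pvMin; split_ifs <;> simp
    rcases List.mem_cons.1 h with h1 | h1
    · rw [h1]; rcases hma with h2 | h2 <;> simp [h2]
    · simp [List.mem_cons.2 (Or.inr (List.mem_cons.2 (Or.inr h1)))]

lemma maxfold_mem : ∀ (xs : List (List Char)) (x : List Char), xs.foldl pvMax x ∈ x :: xs := by
  intro xs
  induction xs with
  | nil => intro x; simp
  | cons a t ih =>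
    intro x
    rw [List.foldl_cons]
    have h := ih (pvMax x a)
    have hma : pvMax x a = x ∨ pvMax x a = a := by
      unfold pvMax; split_ifs <;> simp
    rcases List.mem_cons.1 h with h1 | h1
    · rw [h1]; rcases hma with h2 | h2 <;> simp [h2]
    · simp [List.mem_cons.2 (Or.inr (List.mem_cons.2 (Or.inr h1)))]

lemma minfold_le : ∀ (xs : List (List Char)) (x y : List Char), y ∈ x :: xs → xs.foldl pvMin x ≤ y := by
  intro xs
  induction xs with
  | nil =>
    intro x y hy
    rcases List.mem_cons.1 hy with h | h
    · simp [h]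
    · exact absurd h List.not_mem_nil
  | cons a t ih =>
    intro x y hy
    rw [List.foldl_cons]
    rcases List.mem_cons.1 hy with h | h
    · subst h
      exact le_trans (ih (pvMin y a) _ List.mem_cons_self) (pvMin_le_left y a)
    · rcases List.mem_cons.1 h with h1 | h1
      · subst h1
        exact le_trans (ih (pvMin x y) _ List.mem_cons_self) (pvMin_le_right x y)
      · exact ih (pvMin x a) y (List.mem_cons.2 (Or.inr h1))

lemma maxfold_ge : ∀ (xs : List (List Char)) (x y : List Char), y ∈ x :: xs → y ≤ xs.foldl pvMax x := by
  intro xs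
  induction xs with
  | nil =>
    intro x y hy
    rcases List.mem_cons.1 hy with h | h
    · simp [h]
    · exact absurd h List.not_mem_nil
  | cons a t ih =>
    intro x y hy
    rw [List.foldl_cons]
    rcases List.mem_cons.1 hy with h | h
    · subst h
      exact le_trans (pvMax_ge_left y a) (ih (pvMax y a) _ List.mem_cons_self)
    · rcases List.mem_cons.1 h with h1 | h1
      · subst h1
        exact le_trans (pvMax_ge_right x y) (ih (pvMax x y) _ List.mem_cons_self)
      · exact ih (pvMax x a) y (List.mem_cons.2 (Or.inr h1))

lemma pairwise_le_getLast : ∀ (l : List (List Char)) (h : l ≠ []),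
    l.Pairwise (fun a b => a ≤ b) → ∀ y ∈ l, y ≤ l.getLast h := by
  intro l
  induction l with
  | nil => intro h; exact absurd rfl h
  | cons a t ih =>
    intro h hp y hy
    cases t with
    | nil =>
      rcases List.mem_cons.1 hy with h1 | h1
      · simp [h1, List.getLast]
      · exact absurd h1 List.not_mem_nil
    | cons b u =>
      rw [List.getLast_cons (List.cons_ne_nil b u)]
      rcases List.mem_cons.1 hy with h1 | h1
      · subst h1
        exact le_trans ((List.pairwise_cons.1 hp).1 _ (List.getLast_mem _))
          (le_refl _)
      · exact ih (List.cons_ne_nil b u) (List.pairwise_cons.1 hp).2 y h1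

-- the stable sort and the canonical LinearOrder instances compute the same list (Decidable is a subsingleton)
lemma sorted_canon (l : List (List Char)) :
    PySem.List.sorted l (fun w => w) false
      = @PySem.List.sorted (List Char) (List Char) List.instLinearOrder.toLT LinearOrder.toDecidableLT l (fun w => w) false := by
  have e : (fun (a b : List Char) => a.decidableLT b)
      = (LinearOrder.toDecidableLT : DecidableRel ((· < ·) : List Char → List Char → Prop)) := by
    funext a b; exact Subsingleton.elim _ _
  exact congrArg (fun d => @PySem.List.sorted (List Char) (List Char) List.instLT d l (fun w => w) false) e

-- the two ends of the sorted window list are exactly the running min / running max folds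
lemma ends_eq (x : List Char) (xs : List (List Char)) :
    ([String.ofList (PySem.List.pyGetD (PySem.List.sorted (x :: xs) (fun w => w) false) 0 []),
      String.ofList (PySem.List.pyGetD (PySem.List.sorted (x :: xs) (fun w => w) false) (-1) [])] : List String)
      = [String.ofList (xs.foldl pvMin x), String.ofList (xs.foldl pvMax x)] := by
  cases h : PySem.List.sorted (x :: xs) (fun w => w) false with
  | nil => exact absurd ((PySem.List.sorted_eq_nil_iff _ _ _).1 h) (List.cons_ne_nil x xs)
  | cons m t =>
    have hmemS : ∀ z, z ∈ m :: t ↔ z ∈ x :: xs := by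
      intro z
      rw [← h]
      exact PySem.List.mem_sorted _ _ _ _
    have hpw : (m :: t).Pairwise (fun a b => a ≤ b) := by
      have hpw0 := PySem.List.sorted_pairwise (κ := List Char) (x :: xs) (fun w => w)
      rw [← sorted_canon, h] at hpw0
      exact hpw0
    have hmin : m = xs.foldl pvMin x := by
      have h1 : xs.foldl pvMin x ≤ m := minfold_le xs x m ((hmemS m).1 List.mem_cons_self)
      have h2 : m ≤ xs.foldl pvMin x := by
        rcases List.mem_cons.1 ((hmemS _).2 (minfold_mem xs x)) with h1' | h1'
        · exact le_of_eq h1'.symm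
        · exact (List.pairwise_cons.1 hpw).1 _ h1'
      exact le_antisymm h2 h1
    have hmax : (m :: t).getLast (List.cons_ne_nil m t) = xs.foldl pvMax x := by
      have h1 : (m :: t).getLast (List.cons_ne_nil m t) ≤ xs.foldl pvMax x :=
        maxfold_ge xs x _ ((hmemS _).1 (List.getLast_mem _))
      have h2 : xs.foldl pvMax x ≤ (m :: t).getLast (List.cons_ne_nil m t) :=
        pairwise_le_getLast (m :: t) (List.cons_ne_nil m t) hpw _ ((hmemS _).2 (maxfold_mem xs x))
      exact le_antisymm h1 h2
    rw [PySem.List.pyGetD_zero_cons, PySem.List.pyGetD_neg_one (m :: t) [] (List.cons_ne_nil m t), hmax, hmin]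

lemma shift (cs : List Char) (K t : Nat) (hK : 1 ≤ K) (h : t + K < cs.length) :
    PySem.List.slice (pvW cs K t) (some 1) (some (K : Int)) ++ [PySem.List.pyGetD cs ((t + K : Nat) : Int) ' ']
      = pvW cs K (t + 1) := by
  have h1 : PySem.List.slice (pvW cs K t) (some ((1:Nat) : Int)) (some (K : Int))
      = ((pvW cs K t).drop 1).take (K - 1) := PySem.List.slice_natCast _ _ _
  have hlen : (pvW cs K t).length = K := by
    simp [pvW]; omega
  have h2 : ((pvW cs K t).drop 1).take (K - 1) = (cs.drop (t+1)).take (K - 1) := by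
    simp [pvW, List.drop_take, List.drop_drop]
  have h3 : PySem.List.pyGetD cs ((t : Int) + (K : Int)) ' ' = cs.getD (t + K) ' ' := by
    rw [show ((t : Int) + (K : Int)) = ((t + K : Nat) : Int) by push_cast; ring,
      PySem.List.pyGetD_natCast]
  have h4 : cs.getD (t + K) ' ' = cs[t + K]'h := List.getD_eq_getElem cs ' ' h
  have h5 : (cs.drop (t+1)).take (K - 1) ++ [cs[t+K]'h] = (cs.drop (t+1)).take K := by
    have hK1 : K - 1 + 1 = K := by omega
    conv_rhs => rw [← hK1]
    rw [List.take_add_one]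
    have e : t + 1 + (K - 1) = t + K := by omega
    have hg : (cs.drop (t+1))[K-1]? = some (cs[t+K]'h) := by
      rw [List.getElem?_drop, e, List.getElem?_eq_getElem h]
    simp [hg]
  push_cast at h1 ⊢
  rw [h1, h2, h3, h4, h5]
  rfl

lemma stepA_eq (cs : List Char) (K t : Nat) (hK : 1 ≤ K) (h : t + K < cs.length)
    (m M : List Char) :
    pvStepA cs (K : Int) (pvW cs K t, m, M) ((t : Int) + (K : Int) + 0)
      = (pvW cs K (t+1), pvMin m (pvW cs K (t+1)), pvMax M (pvW cs K (t+1))) := by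
  have hs := shift cs K t hK h
  simp only [pvStepA, add_zero]
  push_cast at hs
  rw [hs]
  simp [pvMin, pvMax]

lemma loopA (cs : List Char) (K : Nat) (hK : 1 ≤ K) : ∀ (j t : Nat) (m M : List Char),
    t + j + K = cs.length →
    (List.range j).foldl (fun st (i : Nat) => pvStepA cs (K : Int) st ((t : Int) + (K : Int) + (i : Int)))
        (pvW cs K t, m, M)
      = (pvW cs K (t+j),
         ((List.range j).map (fun i => pvW cs K (t+1+i))).foldl pvMin m,
         ((List.range j).map (fun i => pvW cs K (t+1+i))).foldl pvMax M) := by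
  intro j
  induction j with
  | zero => intro t m M h; simp
  | succ j ih =>
    intro t m M h
    rw [List.range_succ_eq_map]
    simp only [List.foldl_cons, List.map_cons, Nat.cast_zero]
    rw [stepA_eq cs K t hK (by omega) m M]
    rw [List.foldl_map, List.map_map]
    have hf : (fun st (i : Nat) => pvStepA cs (K : Int) st ((t : Int) + (K : Int) + ((i + 1 : Nat) : Int)))
        = (fun st (i : Nat) => pvStepA cs (K : Int) st (((t+1 : Nat) : Int) + (K : Int) + (i : Int))) := by
      funext st i
      congr 1
      push_cast
      ring
    have := ih (t+1) (pvMin m (pvW cs K (t+1))) (pvMax M (pvW cs K (t+1))) (by omega)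
    simp only [Nat.succ_eq_add_one, Function.comp_def, add_zero]
    rw [hf]
    rw [this]
    have e1 : t + 1 + j = t + (j + 1) := by omega
    have e2 : ∀ i, t + 1 + 1 + i = t + 1 + (i + 1) := by omega
    simp only [e1, e2]

-- case s = ""
lemma case_empty (k : Int) (hk : 0 ≤ k) :
    getSmallestLargest "" k = getSmallestLargest_alt "" k := by
  rw [portA_eq, portB_eq]
  have hA : PySem.List.pyRange k (("".toList.length : Nat) : Int) 1 = [] := by
    apply PySem.List.pyRange_one_eq_nil
    simp
    omega
  have hc0 : PySem.List.slice "".toList none (some k) = [] := slice_nil_chars _ _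
  rw [hA, hc0]
  simp only [List.foldl_nil]
  have hm : (1:Int) ≤ max 1 (("".toList.length : Int) - k + 1) := le_max_left _ _
  have hr : PySem.List.pyRange 0 (max 1 (("".toList.length : Int) - k + 1)) 1
      = 0 :: PySem.List.pyRange 1 (max 1 (("".toList.length : Int) - k + 1)) 1 :=
    PySem.List.pyRange_one_cons (by omega)
  rw [hr]
  simp only [List.map_cons]
  rw [show PySem.List.slice "".toList (some 0) (some (0 + k)) = [] from slice_nil_chars _ _]
  have hall : ((PySem.List.pyRange 1 (max 1 (("".toList.length : Int) - k + 1)) 1).map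
        (fun i => PySem.List.slice "".toList (some i) (some (i + k))))
      = (PySem.List.pyRange 1 (max 1 (("".toList.length : Int) - k + 1)) 1).map
        (fun _ => ([] : List Char)) :=
    List.map_congr_left (fun a _ => slice_nil_chars _ _)
  rw [hall]
  have hminc : ∀ (l : List Int), (l.map (fun _ => ([] : List Char))).foldl pvMin [] = [] := by
    intro l; induction l with
    | nil => rfl
    | cons a l ih => simp only [List.map_cons, List.foldl_cons, pvMin]; simpa using ih
  have hmaxc : ∀ (l : List Int), (l.map (fun _ => ([] : List Char))).foldl pvMax [] = [] := by
    intro l; induction l with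
    | nil => rfl
    | cons a l ih => simp only [List.map_cons, List.foldl_cons, pvMax]; simpa using ih
  rw [ends_eq, hminc, hmaxc]

-- case 1 ≤ K ≤ n : the real sliding-window case
lemma case_main (s : String) (K : Nat) (hK : 1 ≤ K) (hKn : K ≤ s.toList.length) :
    getSmallestLargest s (K : Int) = getSmallestLargest_alt s (K : Int) := by
  rw [portA_eq, portB_eq]
  have hc0 : PySem.List.slice s.toList none (some (K : Int)) = pvW s.toList K 0 := by
    rw [PySem.List.slice_to _ (by positivity)]
    simp [pvW]
  have hAr : PySem.List.pyRange (K : Int) ((s.toList.length : Nat) : Int) 1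
      = (List.range (s.toList.length - K)).map (fun (i : Nat) => (K : Int) + (i : Int)) := by
    rw [PySem.List.pyRange_one]
    have h9 : ((s.toList.length : Int) - (K : Int)).toNat = s.toList.length - K := by omega
    rw [h9]
  have hf : (fun (st : List Char × List Char × List Char) (i : Nat) =>
        pvStepA s.toList (K : Int) st ((K : Int) + (i : Int)))
      = (fun st (i : Nat) => pvStepA s.toList (K : Int) st (((0:Nat) : Int) + (K : Int) + (i : Int))) := by
    funext st i
    congr 1
    push_cast
    ring
  have hA := loopA s.toList K hK (s.toList.length - K) 0 (pvW s.toList K 0) (pvW s.toList K 0) (by omega)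
  rw [hAr, hc0, List.foldl_map, hf, hA]
  have hmax : max 1 ((s.toList.length : Int) - (K : Int) + 1)
      = ((s.toList.length - K + 1 : Nat) : Int) := by
    push_cast [hKn]
    omega
  have hwin : ∀ (i : Nat), PySem.List.slice s.toList (some ((i : Nat) : Int)) (some (((i : Nat) : Int) + (K : Int)))
      = pvW s.toList K i := by
    intro i
    rw [show ((i : Nat) : Int) + (K : Int) = ((i + K : Nat) : Int) by push_cast; ring]
    rw [PySem.List.slice_natCast]
    simp [pvW]
  rw [hmax, PySem.List.pyRange_zero_natCast, List.map_map]
  rw [show ((fun i => PySem.List.slice s.toList (some i) (some (i + (K:Int)))) ∘ fun (j : Nat) => (j : Int))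
      = (fun (j : Nat) => pvW s.toList K j) from funext (fun j => hwin j)]
  rw [List.range_succ_eq_map, List.map_cons, List.map_map]
  rw [ends_eq]
  have hsh : ((List.range (s.toList.length - K)).map ((fun (j : Nat) => pvW s.toList K j) ∘ fun i => i + 1))
      = (List.range (s.toList.length - K)).map (fun i => pvW s.toList K (0 + 1 + i)) := by
    apply List.map_congr_left
    intro a _
    simp only [Function.comp_apply]
    congr 1
    omega
  rw [hsh]

-- case K > n (k larger than the string)
lemma case_big (s : String) (K : Nat) (hK : 1 ≤ K) (hKn : s.toList.length < K) :
    getSmallestLargest s (K : Int) = getSmallestLargest_alt s (K : Int) := by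
  rw [portA_eq, portB_eq]
  have hc0 : PySem.List.slice s.toList none (some (K : Int)) = s.toList := by
    rw [PySem.List.slice_to _ (by positivity)]
    exact List.take_of_length_le (by simpa using Nat.le_of_lt hKn)
  have hAr : PySem.List.pyRange (K : Int) ((s.toList.length : Nat) : Int) 1 = [] := by
    apply PySem.List.pyRange_one_eq_nil
    exact_mod_cast Nat.le_of_lt hKn
  rw [hc0, hAr]
  simp only [List.foldl_nil]
  have hmax : max 1 ((s.toList.length : Int) - (K : Int) + 1) = 1 := by
    have h1 : (s.toList.length : Int) < (K : Int) := by exact_mod_cast hKn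
    omega
  rw [hmax]
  rw [show PySem.List.pyRange 0 1 1 = [0] from rfl]
  simp only [List.map_cons, List.map_nil, zero_add]
  rw [show PySem.List.slice s.toList (some 0) (some (K : Int)) = s.toList from by simpa using hc0]
  rw [ends_eq]
  rfl

-- ===== VERDICT (by name: the statement is the Claim_ definition above) =====
theorem getSmallestLargest_spec : Claim_unchanged_getSmallestLargest := by
  intro s k _ hpre hnd
  show getSmallestLargest s k = getSmallestLargest_alt s k
  by_cases hs : s = ""
  · subst hs
    have hk : 0 ≤ k := by
      unfold Pre_getSmallestLargest at hpre
      simpa using hpre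
    exact case_empty k hk
  · have hk : 1 ≤ k := by
      by_contra hlt
      exact hnd ⟨by omega, hs⟩
    have hkK : k = (k.toNat : Int) := (Int.toNat_of_nonneg (by omega)).symm
    have hK1 : 1 ≤ k.toNat := by omega
    rw [hkK]
    by_cases hKn : k.toNat ≤ s.toList.length
    · exact case_main s k.toNat hK1 hKn
    · exact case_big s k.toNat hK1 (by omega)

theorem getSmallestLargest_changed : Claim_changed_getSmallestLargest := by
  unfold Claim_changed_getSmallestLargest; decide
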